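-- pv_equiv track=rewrite | github.com/nATHANnSil/FPAA-Trabalhos-em-Grupo | TrabalhoGrupo2/main.py | fill_all_regions
-- ===== SOURCE A (Python) =====
-- import collections
--
-- def flood_fill(grid, sx, sy, color):
--     n, m = len(grid), len(grid[0])
--     queue = collections.deque([(sx, sy)])
--     grid[sx][sy] = color
--     while queue:
--         i, j = queue.popleft()
--         for di, dj in [(-1,0),(1,0),(0,-1),(0,1)]:
--             ni, nj = i+di, j+dj
--             if 0 <= ni < n and 0 <= nj < m and grid[ni][nj] == 0:
--                 grid[ni][nj] = color
--                 queue.append((ni, nj))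
--
-- def fill_all_regions(grid, sx, sy):
--     color = 2
--     flood_fill(grid, sx, sy, color)
--     n, m = len(grid), len(grid[0])
--     for i in range(n):
--         for j in range(m):
--             if grid[i][j] == 0:
--                 color += 1
--                 flood_fill(grid, i, j, color)
--     return color
-- ===== SOURCE B (Python) =====
-- def fill_all_regions(grid, sx, sy):
--     # Label-propagation flood fill: each region is computed as a pure set by
--     # saturating whole-grid sweeps (no queue), then painted in one go.
--     n, m = len(grid), len(grid[0])
--
--     def region(si, sj):
--         # the seed plus every in-bounds 0-cell reachable from it through 0-cells,
--         # found by repeated whole-grid sweeps until a fixed point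
--         reach = {(si, sj)}
--         changed = True
--         while changed:
--             changed = False
--             for i in range(n):
--                 for j in range(m):
--                     if grid[i][j] == 0 and (i, j) not in reach and (
--                             (i - 1, j) in reach or (i + 1, j) in reach
--                             or (i, j - 1) in reach or (i, j + 1) in reach):
--                         reach.add((i, j))
--                         changed = True
--         return reach
--
--     def paint(si, sj, color):
--         grid[si][sj] = color
--         for (i, j) in region(si, sj):
--             grid[i][j] = color
--
--     color = 2
--     paint(sx, sy, color)
--     for i in range(n):
--         for j in range(m):
--             if grid[i][j] == 0:
--                 color += 1
--                 paint(i, j, color)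
--     return color
-- ===== Notes on version B (the rewrite author's own statement) =====
-- stated objective: alternative
-- what changed: Each region is computed as a pure set by label-propagation (repeated whole-grid sweeps to a fixed point) and then painted in one go, instead of A's queue-based BFS that mutates the grid cell by cell while searching.
import Mathlib
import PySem

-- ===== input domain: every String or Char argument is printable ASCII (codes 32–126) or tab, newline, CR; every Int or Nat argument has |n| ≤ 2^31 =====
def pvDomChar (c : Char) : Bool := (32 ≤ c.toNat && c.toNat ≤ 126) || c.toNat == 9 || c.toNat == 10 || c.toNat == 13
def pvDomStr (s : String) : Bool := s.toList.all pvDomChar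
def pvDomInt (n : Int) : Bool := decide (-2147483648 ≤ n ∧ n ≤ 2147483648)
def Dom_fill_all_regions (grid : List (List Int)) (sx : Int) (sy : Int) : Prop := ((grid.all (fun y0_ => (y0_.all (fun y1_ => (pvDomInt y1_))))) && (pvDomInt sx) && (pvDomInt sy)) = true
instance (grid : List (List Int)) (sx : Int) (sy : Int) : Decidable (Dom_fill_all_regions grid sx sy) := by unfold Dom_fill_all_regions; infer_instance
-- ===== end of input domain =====

-- B replaces A's queue-based BFS flood fill by whole-grid label-propagation sweeps per
-- region (objective: alternative, not faster).  Both A and B mutate the Python grid in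
-- place identically; the equivalence proved here is about the return value.

-- Shared Python-indexing helpers (hand-ported, exact for lists: a negative index counts
-- from the end; an out-of-range write is a no-op here where Python raises — Pre_ excludes that).
def pvNorm (len : Nat) (i : Int) : Int := if i < 0 then i + len else i

def pvSetCell (g : List (List Int)) (i j v : Int) : List (List Int) :=
  let r := (pvNorm g.length i).toNat
  match g[r]? with
  | some row => g.set r (row.set (pvNorm row.length j).toNat v)
  | none => g

-- grid[i][j] for 0 ≤ i, 0 ≤ j (the only reads both Pythons perform); exact under Pre_
def pvCell (g : List (List Int)) (i j : Int) : Int :=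
  (((g[i.toNat]?).getD [])[j.toNat]?).getD 0

def pvDirs : List (Int × Int) := [(-1,0),(1,0),(0,-1),(0,1)]

-- ===== PORT A =====
def pvZCount (g : List (List Int)) : Nat := (g.map (fun row => row.count 0)).sum

def pvBfsStep (n m color : Int) (i j : Int) (st : List (List Int) × List (Int × Int))
    (d : Int × Int) : List (List Int) × List (Int × Int) :=
  let ni := i + d.1
  let nj := j + d.2
  if 0 ≤ ni ∧ ni < n ∧ 0 ≤ nj ∧ nj < m ∧ pvCell st.1 ni nj = 0 then
    (pvSetCell st.1 ni nj color, st.2 ++ [(ni, nj)])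
  else st

-- the while-queue loop; the fuel is a totality guard only (2·zeros+|queue| strictly decreases)
def pvBfs (n m color : Int) : Nat → List (List Int) × List (Int × Int) → List (List Int)
  | 0, st => st.1
  | fuel+1, (g, q) =>
    match q with
    | [] => g
    | (i, j) :: rest => pvBfs n m color fuel (pvDirs.foldl (pvBfsStep n m color i j) (g, rest))

def pvFlood (g : List (List Int)) (sx sy color : Int) : List (List Int) :=
  let n : Int := g.length
  let m : Int := ((g[0]?).getD []).length
  let g1 := pvSetCell g sx sy color
  pvBfs n m color (2 * pvZCount g1 + 2) (g1, [(sx, sy)])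

def fill_all_regions (grid : List (List Int)) (sx : Int) (sy : Int) : Int :=
  let g0 := pvFlood grid sx sy 2
  let n : Int := grid.length
  let m : Int := ((grid[0]?).getD []).length
  ((PySem.List.pyRange 0 n 1).foldl (fun st i =>
      (PySem.List.pyRange 0 m 1).foldl (fun (st : List (List Int) × Int) j =>
        if pvCell st.1 i j = 0 then (pvFlood st.1 i j (st.2 + 1), st.2 + 1) else st) st)
    (g0, 2)).2

-- ===== PORT B =====
def pvNbr (reach : PySem.Set (Int × Int)) (i j : Int) : Bool :=
  reach.contains (i-1, j) || reach.contains (i+1, j) || reach.contains (i, j-1) || reach.contains (i, j+1)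

def pvSweep (g : List (List Int)) (n m : Int) (reach : PySem.Set (Int × Int)) :
    PySem.Set (Int × Int) × Bool :=
  (PySem.List.pyRange 0 n 1).foldl (fun st i =>
    (PySem.List.pyRange 0 m 1).foldl (fun (st : PySem.Set (Int × Int) × Bool) j =>
      if pvCell g i j = 0 ∧ ¬ st.1.contains (i, j) ∧ pvNbr st.1 i j then
        (PySem.Set.add st.1 (i, j), true)
      else st) st) (reach, false)

-- the while-changed loop; the fuel is a totality guard only (each changed sweep grows reach)
def pvSaturate (g : List (List Int)) (n m : Int) : Nat → PySem.Set (Int × Int) → PySem.Set (Int × Int)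
  | 0, reach => reach
  | fuel+1, reach =>
    let sw := pvSweep g n m reach
    if sw.2 then pvSaturate g n m fuel sw.1 else sw.1

def pvRegion (g : List (List Int)) (n m si sj : Int) : PySem.Set (Int × Int) :=
  pvSaturate g n m ((n * m).toNat + 1) (PySem.Set.ofList [(si, sj)])

def pvPaint (g : List (List Int)) (n m si sj color : Int) : List (List Int) :=
  let g1 := pvSetCell g si sj color
  (pvRegion g1 n m si sj).foldl (fun g p => pvSetCell g p.1 p.2 color) g1

def fill_all_regions_alt (grid : List (List Int)) (sx : Int) (sy : Int) : Int :=
  let n : Int := grid.length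
  let m : Int := ((grid[0]?).getD []).length
  let g0 := pvPaint grid n m sx sy 2
  ((PySem.List.pyRange 0 n 1).foldl (fun st i =>
      (PySem.List.pyRange 0 m 1).foldl (fun (st : List (List Int) × Int) j =>
        if pvCell st.1 i j = 0 then (pvPaint st.1 n m i j (st.2 + 1), st.2 + 1) else st) st)
    (g0, 2)).2

-- ===== PRECONDITION & SPEC =====
-- Exactly the inputs on which the Python A returns (measured exact on random grids):
-- a nonempty grid whose rows are all at least as long as row 0, a Python-valid
-- (possibly negative) row index sx, and a column index sy valid for row sx.
def Pre_fill_all_regions (grid : List (List Int)) (sx : Int) (sy : Int) : Prop :=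
  0 < grid.length ∧
  (∀ row ∈ grid, ((grid[0]?).getD []).length ≤ row.length) ∧
  (-(grid.length : Int) ≤ sx ∧ sx < grid.length) ∧
  (-(((grid[(pvNorm grid.length sx).toNat]?).getD []).length : Int) ≤ sy ∧
    sy < ((grid[(pvNorm grid.length sx).toNat]?).getD []).length)
instance (grid : List (List Int)) (sx : Int) (sy : Int) : Decidable (Pre_fill_all_regions grid sx sy) := by
  unfold Pre_fill_all_regions; infer_instance

def pvWitness_fill_all_regions : List (List Int) × Int × Int := ([[0, 1, 0], [0, 0, 1]], 0, 1)

def Spec_fill_all_regions (grid : List (List Int)) (sx : Int) (sy : Int) (out : Int) : Prop := out = fill_all_regions_alt grid sx sy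
instance (grid : List (List Int)) (sx : Int) (sy : Int) (out : Int) : Decidable (Spec_fill_all_regions grid sx sy out) := by unfold Spec_fill_all_regions; infer_instance

-- ===== CLAIM (what is proved, stated in full; the proofs are below) =====
def Claim_equal_fill_all_regions : Prop := ∀ (grid : List (List Int)) (sx : Int) (sy : Int), Dom_fill_all_regions grid sx sy → Pre_fill_all_regions grid sx sy → Spec_fill_all_regions grid sx sy (fill_all_regions grid sx sy)

-- ===== LEMMAS AND PROOFS =====

-- row a of g (as the ports read it)
def pvRow (g : List (List Int)) (a : Nat) : List Int := (g[a]?).getD []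

theorem pvCell_natCast (g : List (List Int)) (a b : Nat) :
    pvCell g (a : Int) (b : Int) = ((pvRow g a)[b]?).getD 0 := by
  simp [pvCell, pvRow]

-- grids with the same shape and the same reads are equal
theorem pv_grid_ext (g h : List (List Int)) (hlen : g.length = h.length)
    (hrows : ∀ k : Nat, (g[k]?).map List.length = (h[k]?).map List.length)
    (hval : ∀ a b : Nat, pvCell g (a : Int) (b : Int) = pvCell h (a : Int) (b : Int)) : g = h := by
  apply List.ext_getElem hlen
  intro k h1 h2
  have hrow : g[k].length = h[k].length := by
    have := hrows k
    simpa [List.getElem?_eq_getElem, h1, h2] using this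
  apply List.ext_getElem hrow
  intro b hb1 hb2
  have := hval k b
  rw [pvCell_natCast, pvCell_natCast] at this
  simpa [pvRow, List.getElem?_eq_getElem, h1, h2, hb1, hb2] using this

def SameShape (g h : List (List Int)) : Prop :=
  g.length = h.length ∧ ∀ k : Nat, (g[k]?).map List.length = (h[k]?).map List.length

theorem sameShape_refl (g : List (List Int)) : SameShape g g := ⟨rfl, fun _ => rfl⟩

theorem sameShape_trans {g h k : List (List Int)} (h1 : SameShape g h) (h2 : SameShape h k) :
    SameShape g k := ⟨h1.1.trans h2.1, fun a => (h1.2 a).trans (h2.2 a)⟩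

theorem sameShape_row {g h : List (List Int)} (hs : SameShape g h) (a : Nat) :
    (pvRow g a).length = (pvRow h a).length := by
  have := hs.2 a
  unfold pvRow
  cases hg : g[a]? with
  | none =>
    have : h[a]? = none := by
      have hlen := hs.1
      simp_all [List.getElem?_eq_none_iff]
    simp [hg, this]
  | some r =>
    cases hh : h[a]? with
    | none => simp [hg, hh] at this
    | some r' => simp [hg, hh] at this; simp [hg, hh, this]

theorem pvSetCell_def (g : List (List Int)) (i j v : Int) :
    pvSetCell g i j v =
      match g[(pvNorm g.length i).toNat]? with
      | some row => g.set (pvNorm g.length i).toNat (row.set (pvNorm row.length j).toNat v)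
      | none => g := rfl

theorem pvSetCell_shape (g : List (List Int)) (i j v : Int) : SameShape (pvSetCell g i j v) g := by
  unfold SameShape
  rw [pvSetCell_def]
  cases hg : g[(pvNorm g.length i).toNat]? with
  | none => exact ⟨rfl, fun _ => rfl⟩
  | some row =>
    dsimp only
    refine ⟨by simp, fun k => ?_⟩
    rw [List.getElem?_set]
    by_cases hk : (pvNorm g.length i).toNat = k
    · subst hk
      have hlt : (pvNorm g.length i).toNat < g.length := by
        by_contra hge
        have hnone : g[(pvNorm g.length i).toNat]? = none := List.getElem?_eq_none (by omega)
        simp [hnone] at hg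
      have hrow : g[(pvNorm g.length i).toNat] = row := by
        simpa [List.getElem?_eq_getElem, hlt] using hg
      simp [hlt, List.getElem?_eq_getElem, hrow]
    · simp [hk]

-- the write lands at the normalized coordinates
theorem pvCell_setCell (g : List (List Int)) (i j v : Int)
    (hr : (pvNorm g.length i).toNat < g.length)
    (hc : (pvNorm (pvRow g (pvNorm g.length i).toNat).length j).toNat
            < (pvRow g (pvNorm g.length i).toNat).length)
    (a b : Nat) :
    pvCell (pvSetCell g i j v) (a : Int) (b : Int) =
      if a = (pvNorm g.length i).toNat ∧ b = (pvNorm (pvRow g (pvNorm g.length i).toNat).length j).toNat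
      then v else pvCell g (a : Int) (b : Int) := by
  have hg : g[(pvNorm g.length i).toNat]? = some (pvRow g (pvNorm g.length i).toNat) := by
    unfold pvRow
    cases h : g[(pvNorm g.length i).toNat]? with
    | none => rw [List.getElem?_eq_none_iff] at h; omega
    | some row => simp [h]
  rw [pvCell_natCast, pvCell_natCast, pvSetCell_def, hg]
  dsimp only
  generalize hR : (pvNorm g.length i).toNat = R at *
  generalize hC : (pvNorm (pvRow g R).length j).toNat = C at *
  simp only [pvRow] at hr hc hg ⊢
  generalize hrow : g[R]?.getD [] = row at *
  rw [List.getElem?_set]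
  by_cases ha : a = R
  · subst ha
    simp only [if_pos rfl, hr, if_pos, ite_true, true_and, Option.getD_some]
    rw [List.getElem?_set]
    by_cases hb : b = C
    · subst hb
      simp [hc]
    · rw [if_neg (fun h : C = b => hb h.symm), if_neg hb, hg]
      rfl
  · have h1 : ¬ (R = a) := fun h => ha h.symm
    have h2 : ¬ (a = R ∧ b = C) := fun h => ha h.1
    simp only [if_neg h1, if_neg h2]

theorem pv_count_set (l : List Int) (k : Nat) (v : Int) (hk : k < l.length)
    (h0 : l[k]? = some 0) (hv : v ≠ 0) : (l.set k v).count 0 + 1 = l.count 0 := by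
  induction l generalizing k with
  | nil => simp at hk
  | cons x xs ih =>
    cases k with
    | zero =>
      simp at h0
      simp [List.set, List.count_cons, h0, hv]
    | succ k =>
      simp at h0 hk
      simp [List.set, List.count_cons]
      have := ih k hk h0
      omega

theorem pvSetCell_nonneg (g : List (List Int)) (i j v : Int)
    (hi : 0 ≤ i) (hr : i.toNat < g.length)
    (hj : 0 ≤ j) (hc : j.toNat < (pvRow g i.toNat).length) :
    pvSetCell g i j v = g.set i.toNat ((pvRow g i.toNat).set j.toNat v) := by
  have hni : pvNorm g.length i = i := by unfold pvNorm; omega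
  have hg : g[i.toNat]? = some (pvRow g i.toNat) := by
    unfold pvRow
    rw [List.getElem?_eq_getElem hr]
    simp
  rw [pvSetCell_def, hni, hg]
  dsimp only
  have hnj : pvNorm (pvRow g i.toNat).length j = j := by unfold pvNorm; omega
  rw [hnj]

theorem pvZCount_setCell (g : List (List Int)) (i j v : Int)
    (hi : 0 ≤ i) (hr : i.toNat < g.length)
    (hj : 0 ≤ j) (hc : j.toNat < (pvRow g i.toNat).length)
    (h0 : pvCell g i j = 0) (hv : v ≠ 0) :
    pvZCount (pvSetCell g i j v) + 1 = pvZCount g := by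
  rw [pvSetCell_nonneg g i j v hi hr hj hc]
  have hg : g[i.toNat]? = some (pvRow g i.toNat) := by
    unfold pvRow
    rw [List.getElem?_eq_getElem hr]
    simp
  have hcount : ((pvRow g i.toNat).set j.toNat v).count 0 + 1 = (pvRow g i.toNat).count 0 := by
    apply pv_count_set _ _ _ hc _ hv
    have := h0
    rw [show (i : Int) = ((i.toNat : Nat) : Int) by omega,
        show (j : Int) = ((j.toNat : Nat) : Int) by omega, pvCell_natCast] at this
    rw [List.getElem?_eq_getElem hc] at this ⊢
    simpa using this
  unfold pvZCount
  have : ∀ (l : List (List Int)) (k : Nat) (r r' : List Int), l[k]? = some r →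
      r'.count 0 + 1 = r.count 0 →
      ((l.set k r').map (fun row => row.count 0)).sum + 1 = (l.map (fun row => row.count 0)).sum := by
    intro l
    induction l with
    | nil => intro k r r' h; simp at h
    | cons x xs ih =>
      intro k r r' h hcnt
      cases k with
      | zero => simp at h; subst h; simp [List.set]; omega
      | succ k =>
        simp at h
        have := ih k r r' h hcnt
        simp [List.set] at this ⊢
        omega
  exact this g i.toNat (pvRow g i.toNat) _ hg hcount

-- reachability through 0-cells (w.r.t. the grid g1 AFTER the seed write)
def InB (n m : Int) (p : Int × Int) : Prop := 0 ≤ p.1 ∧ p.1 < n ∧ 0 ≤ p.2 ∧ p.2 < m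

def ZeroAt (g1 : List (List Int)) (n m : Int) (p : Int × Int) : Prop :=
  InB n m p ∧ pvCell g1 p.1 p.2 = 0

inductive Reach (g1 : List (List Int)) (n m : Int) (s : Int × Int) : Int × Int → Prop
  | base : Reach g1 n m s s
  | step {p q : Int × Int} : Reach g1 n m s p → (∃ d ∈ pvDirs, q = (p.1 + d.1, p.2 + d.2)) →
      ZeroAt g1 n m q → Reach g1 n m s q

theorem reach_cases {g1 n m s x} (h : Reach g1 n m s x) : x = s ∨ ZeroAt g1 n m x := by
  cases h with
  | base => exact Or.inl rfl
  | step _ _ hz => exact Or.inr hz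

-- a flood context: the grid right after the seed write, and everything both floods share
structure FC : Type where
  g1 : List (List Int)
  n : Int
  m : Int
  color : Int
  s : Int × Int
  hn : (g1.length : Int) = n
  hm0 : 0 ≤ m
  hrows : ∀ a : Nat, a < g1.length → m.toNat ≤ (pvRow g1 a).length
  hc : color ≠ 0
  hsr : (pvNorm g1.length s.1).toNat < g1.length
  hsc : (pvNorm (pvRow g1 (pvNorm g1.length s.1).toNat).length s.2).toNat
          < (pvRow g1 (pvNorm g1.length s.1).toNat).length
  hseed : pvCell g1 ((pvNorm g1.length s.1).toNat : Int)
            ((pvNorm (pvRow g1 (pvNorm g1.length s.1).toNat).length s.2).toNat : Int) = color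

theorem fc_not_zero_s (C : FC) : ¬ ZeroAt C.g1 C.n C.m C.s := by
  rintro ⟨⟨h1, h2, h3, h4⟩, hz⟩
  have hn := C.hn
  have hseed := C.hseed
  have hni : pvNorm C.g1.length C.s.1 = C.s.1 := by unfold pvNorm; omega
  rw [hni] at hseed
  have hr : (C.s.1.toNat : Int) = C.s.1 := by omega
  have hrows := C.hrows C.s.1.toNat (by omega)
  have hnj : pvNorm (pvRow C.g1 C.s.1.toNat).length C.s.2 = C.s.2 := by
    unfold pvNorm
    omega
  rw [hnj] at hseed
  have hcc : (C.s.2.toNat : Int) = C.s.2 := by omega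
  rw [hr, hcc] at hseed
  have : pvCell C.g1 C.s.1 C.s.2 = C.color := by
    have := hseed
    rwa [show C.s.1 = ((C.s.1.toNat : Nat) : Int) by omega,
        show C.s.2 = ((C.s.2.toNat : Nat) : Int) by omega] at hz ⊢
  exact C.hc (by rw [← this, hz])

def Mk (C : FC) (g : List (List Int)) (p : Int × Int) : Prop :=
  ZeroAt C.g1 C.n C.m p ∧ pvCell g p.1 p.2 = C.color

-- the final pointwise description both floods satisfy
def Desc (C : FC) (g : List (List Int)) : Prop :=
  SameShape g C.g1 ∧ ∀ a b : Nat,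
    (ZeroAt C.g1 C.n C.m ((a : Int), (b : Int)) ∧ Reach C.g1 C.n C.m C.s ((a : Int), (b : Int)) →
      pvCell g (a : Int) (b : Int) = C.color) ∧
    (¬ (ZeroAt C.g1 C.n C.m ((a : Int), (b : Int)) ∧ Reach C.g1 C.n C.m C.s ((a : Int), (b : Int))) →
      pvCell g (a : Int) (b : Int) = pvCell C.g1 (a : Int) (b : Int))

structure BfsInv (C : FC) (g : List (List Int)) (q : List (Int × Int)) : Prop where
  shape : SameShape g C.g1
  val : ∀ a b : Nat, pvCell g (a : Int) (b : Int) = pvCell C.g1 (a : Int) (b : Int) ∨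
        (ZeroAt C.g1 C.n C.m ((a : Int), (b : Int)) ∧ Reach C.g1 C.n C.m C.s ((a : Int), (b : Int)) ∧
          pvCell g (a : Int) (b : Int) = C.color)
  qmem : ∀ p ∈ q, p = C.s ∨ Mk C g p
  qreach : ∀ p ∈ q, Reach C.g1 C.n C.m C.s p
  closed : ∀ p, (p = C.s ∨ Mk C g p) → p ∉ q → ∀ d ∈ pvDirs,
      ZeroAt C.g1 C.n C.m (p.1 + d.1, p.2 + d.2) → Mk C g (p.1 + d.1, p.2 + d.2)

structure MidInv (C : FC) (i j : Int) (done : List (Int × Int)) (g : List (List Int))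
    (q : List (Int × Int)) : Prop where
  shape : SameShape g C.g1
  val : ∀ a b : Nat, pvCell g (a : Int) (b : Int) = pvCell C.g1 (a : Int) (b : Int) ∨
        (ZeroAt C.g1 C.n C.m ((a : Int), (b : Int)) ∧ Reach C.g1 C.n C.m C.s ((a : Int), (b : Int)) ∧
          pvCell g (a : Int) (b : Int) = C.color)
  qmem : ∀ p ∈ q, p = C.s ∨ Mk C g p
  qreach : ∀ p ∈ q, Reach C.g1 C.n C.m C.s p
  popped : Reach C.g1 C.n C.m C.s (i, j)
  closedO : ∀ p, (p = C.s ∨ Mk C g p) → p ∉ q → p ≠ (i, j) → ∀ d ∈ pvDirs,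
      ZeroAt C.g1 C.n C.m (p.1 + d.1, p.2 + d.2) → Mk C g (p.1 + d.1, p.2 + d.2)
  closedP : ∀ d ∈ done, ZeroAt C.g1 C.n C.m (i + d.1, j + d.2) → Mk C g (i + d.1, j + d.2)

theorem pv_cast_pair {p : Int × Int} (h1 : 0 ≤ p.1) (h2 : 0 ≤ p.2) :
    ((p.1.toNat : Int), (p.2.toNat : Int)) = p := by
  cases p with
  | mk x y =>
    simp only [Prod.mk.injEq]
    constructor <;> simp_all <;> omega

theorem pvBfsStep_def (n m color i j : Int) (st : List (List Int) × List (Int × Int)) (d : Int × Int) :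
    pvBfsStep n m color i j st d =
      if 0 ≤ i + d.1 ∧ i + d.1 < n ∧ 0 ≤ j + d.2 ∧ j + d.2 < m ∧ pvCell st.1 (i + d.1) (j + d.2) = 0 then
        (pvSetCell st.1 (i + d.1) (j + d.2) color, st.2 ++ [(i + d.1, j + d.2)])
      else st := rfl

theorem pv_step_lemma (C : FC) (i j : Int) (done : List (Int × Int)) (g : List (List Int))
    (q : List (Int × Int)) (d : Int × Int) (hd : d ∈ pvDirs)
    (h : MidInv C i j done g q) :
    MidInv C i j (done ++ [d]) (pvBfsStep C.n C.m C.color i j (g, q) d).1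
        (pvBfsStep C.n C.m C.color i j (g, q) d).2 ∧
    2 * pvZCount (pvBfsStep C.n C.m C.color i j (g, q) d).1 +
        (pvBfsStep C.n C.m C.color i j (g, q) d).2.length ≤ 2 * pvZCount g + q.length := by
  rw [pvBfsStep_def]
  by_cases hguard : 0 ≤ i + d.1 ∧ i + d.1 < C.n ∧ 0 ≤ j + d.2 ∧ j + d.2 < C.m ∧
      pvCell g (i + d.1) (j + d.2) = 0
  case neg =>
    rw [if_neg hguard]
    refine ⟨⟨h.shape, h.val, h.qmem, h.qreach, h.popped, h.closedO, ?_⟩, le_refl _⟩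
    intro d' hd' hz
    rcases List.mem_append.1 hd' with hmem | hmem
    · exact h.closedP d' hmem hz
    · rw [show d' = d by simpa using hmem] at hz ⊢
      obtain ⟨⟨hb1, hb2, hb3, hb4⟩, hz0⟩ := hz
      simp only at hb1 hb2 hb3 hb4 hz0
      have hcast : (((i + d.1).toNat : Int), ((j + d.2).toNat : Int)) = (i + d.1, j + d.2) :=
        pv_cast_pair (p := (i + d.1, j + d.2)) hb1 hb3
      have hval := h.val (i + d.1).toNat (j + d.2).toNat
      rw [show ((i + d.1).toNat : Int) = i + d.1 by omega,
          show ((j + d.2).toNat : Int) = j + d.2 by omega] at hval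
      rcases hval with heq | ⟨_, _, hcol⟩
      · exact absurd ⟨hb1, hb2, hb3, hb4, heq.trans hz0⟩ hguard
      · exact ⟨⟨⟨hb1, hb2, hb3, hb4⟩, hz0⟩, hcol⟩
  case pos =>
    rw [if_pos hguard]
    obtain ⟨hb1, hb2, hb3, hb4, hz⟩ := hguard
    have hglen : g.length = C.g1.length := h.shape.1
    have hn := C.hn
    have hm0 := C.hm0
    have hrlen : (pvRow g (i + d.1).toNat).length = (pvRow C.g1 (i + d.1).toNat).length :=
      sameShape_row h.shape _
    have hrows := C.hrows (i + d.1).toNat (by omega)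
    have hrc : (i + d.1).toNat < g.length := by omega
    have hcc : (j + d.2).toNat < (pvRow g (i + d.1).toNat).length := by omega
    -- the pointwise effect of the write
    have hni : pvNorm g.length (i + d.1) = i + d.1 := by unfold pvNorm; omega
    have hnj : pvNorm (pvRow g (i + d.1).toNat).length (j + d.2) = j + d.2 := by
      unfold pvNorm; omega
    have E : ∀ a b : Nat,
        pvCell (pvSetCell g (i + d.1) (j + d.2) C.color) (a : Int) (b : Int) =
          if a = (i + d.1).toNat ∧ b = (j + d.2).toNat then C.color
          else pvCell g (a : Int) (b : Int) := by
      intro a b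
      have := pvCell_setCell g (i + d.1) (j + d.2) C.color
        (by rw [hni]; omega) (by rw [hni, hnj]; exact hcc) a b
      rwa [hni, hnj] at this
    -- the freshly marked cell is a zero cell of g1, reachable
    have hzero1 : ZeroAt C.g1 C.n C.m (i + d.1, j + d.2) := by
      have hval := h.val (i + d.1).toNat (j + d.2).toNat
      rw [show ((i + d.1).toNat : Int) = i + d.1 by omega,
          show ((j + d.2).toNat : Int) = j + d.2 by omega] at hval
      rcases hval with heq | ⟨_, _, hcol⟩
      · exact ⟨⟨hb1, hb2, hb3, hb4⟩, heq ▸ hz⟩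
      · exact absurd (hz ▸ hcol.symm) C.hc
    have hreach : Reach C.g1 C.n C.m C.s (i + d.1, j + d.2) :=
      Reach.step h.popped ⟨d, by simpa using hd, rfl⟩ hzero1
    have hmkNew : Mk C (pvSetCell g (i + d.1) (j + d.2) C.color) (i + d.1, j + d.2) := by
      refine ⟨hzero1, ?_⟩
      have := E (i + d.1).toNat (j + d.2).toNat
      rw [show ((i + d.1).toNat : Int) = i + d.1 by omega,
          show ((j + d.2).toNat : Int) = j + d.2 by omega] at this
      simpa using this
    -- marks are monotone, unmarked cells keep their value
    have hEcell : ∀ p : Int × Int, InB C.n C.m p →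
        pvCell (pvSetCell g (i + d.1) (j + d.2) C.color) p.1 p.2 =
          if p = (i + d.1, j + d.2) then C.color else pvCell g p.1 p.2 := by
      intro p hp
      obtain ⟨hp1, hp2, hp3, hp4⟩ := hp
      have := E p.1.toNat p.2.toNat
      rw [show ((p.1.toNat : Nat) : Int) = p.1 by omega,
          show ((p.2.toNat : Nat) : Int) = p.2 by omega] at this
      rw [this]
      by_cases hpe : p = (i + d.1, j + d.2)
      · rw [if_pos hpe, if_pos]
        rw [hpe]
        constructor <;> simp <;> omega
      · rw [if_neg hpe, if_neg]
        intro ⟨e1, e2⟩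
        apply hpe
        have : p = ((p.1.toNat : Int), (p.2.toNat : Int)) := (pv_cast_pair hp1 hp3).symm
        rw [this, e1, e2]
        exact pv_cast_pair (p := (i + d.1, j + d.2)) hb1 hb3
    have hmono : ∀ p, Mk C g p → Mk C (pvSetCell g (i + d.1) (j + d.2) C.color) p := by
      intro p ⟨hzp, hcp⟩
      refine ⟨hzp, ?_⟩
      rw [hEcell p hzp.1]
      by_cases hpe : p = (i + d.1, j + d.2)
      · rw [if_pos hpe]
      · rw [if_neg hpe]; exact hcp
    have hback : ∀ p, p ≠ (i + d.1, j + d.2) →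
        Mk C (pvSetCell g (i + d.1) (j + d.2) C.color) p → Mk C g p := by
      intro p hpe ⟨hzp, hcp⟩
      refine ⟨hzp, ?_⟩
      rw [hEcell p hzp.1, if_neg hpe] at hcp
      exact hcp
    have hsne : C.s ≠ (i + d.1, j + d.2) := by
      intro hse
      have := fc_not_zero_s C
      rw [hse] at this
      exact this hzero1
    refine ⟨⟨?_, ?_, ?_, ?_, h.popped, ?_, ?_⟩, ?_⟩
    · exact sameShape_trans (pvSetCell_shape g _ _ _) h.shape
    · intro a b
      by_cases hab : a = (i + d.1).toNat ∧ b = (j + d.2).toNat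
      · right
        rw [E a b, if_pos hab]
        obtain ⟨ha, hb⟩ := hab
        subst ha; subst hb
        rw [show ((i + d.1).toNat : Int) = i + d.1 by omega,
            show ((j + d.2).toNat : Int) = j + d.2 by omega]
        exact ⟨hzero1, hreach, rfl⟩
      · rw [E a b, if_neg hab]
        exact h.val a b
    · intro p hp
      rcases List.mem_append.1 hp with hp | hp
      · rcases h.qmem p hp with hps | hmk
        · exact Or.inl hps
        · exact Or.inr (hmono p hmk)
      · simp at hp
        subst hp
        exact Or.inr hmkNew
    · intro p hp
      rcases List.mem_append.1 hp with hp | hp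
      · exact h.qreach p hp
      · simp at hp; subst hp; exact hreach
    · intro p hps hpq hpij d' hd' hz'
      have hpne : p ≠ (i + d.1, j + d.2) := by
        intro he
        exact hpq (List.mem_append.2 (Or.inr (by simp [he])))
      have hpq' : p ∉ q := fun hin => hpq (List.mem_append.2 (Or.inl hin))
      have hps' : p = C.s ∨ Mk C g p := by
        rcases hps with hps | hmk
        · exact Or.inl hps
        · exact Or.inr (hback p hpne hmk)
      exact hmono _ (h.closedO p hps' hpq' hpij d' hd' hz')
    · intro d' hd' hz'
      rcases List.mem_append.1 hd' with hmem | hmem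
      · exact hmono _ (h.closedP d' hmem hz')
      · simp at hmem
        subst hmem
        exact hmkNew
    · have hzc : pvZCount (pvSetCell g (i + d.1) (j + d.2) C.color) + 1 = pvZCount g :=
        pvZCount_setCell g _ _ _ hb1 hrc hb3 hcc hz C.hc
      simp only [List.length_append, List.length_singleton]
      omega

theorem pv_fold_dirs (C : FC) (i j : Int) :
    ∀ (ds done : List (Int × Int)), done ++ ds = pvDirs →
    ∀ (g : List (List Int)) (q : List (Int × Int)), MidInv C i j done g q →
    MidInv C i j pvDirs (ds.foldl (pvBfsStep C.n C.m C.color i j) (g, q)).1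
        (ds.foldl (pvBfsStep C.n C.m C.color i j) (g, q)).2 ∧
    2 * pvZCount (ds.foldl (pvBfsStep C.n C.m C.color i j) (g, q)).1 +
        (ds.foldl (pvBfsStep C.n C.m C.color i j) (g, q)).2.length ≤ 2 * pvZCount g + q.length := by
  intro ds
  induction ds with
  | nil =>
    intro done hsplit g q hmid
    simp only [List.foldl_nil]
    rw [List.append_nil] at hsplit
    exact ⟨hsplit ▸ hmid, le_refl _⟩
  | cons d ds ih =>
    intro done hsplit g q hmid
    have hd : d ∈ pvDirs := by
      rw [← hsplit]
      exact List.mem_append.2 (Or.inr (List.mem_cons_self))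
    obtain ⟨hmid', hle'⟩ := pv_step_lemma C i j done g q d hd hmid
    have hsplit' : (done ++ [d]) ++ ds = pvDirs := by
      rw [List.append_assoc]
      simpa using hsplit
    have := ih (done ++ [d]) hsplit' (pvBfsStep C.n C.m C.color i j (g, q) d).1
      (pvBfsStep C.n C.m C.color i j (g, q) d).2 hmid'
    simp only [List.foldl_cons]
    constructor
    · exact this.1
    · exact le_trans this.2 hle'

theorem pv_bfs_run (C : FC) : ∀ (fuel : Nat) (g : List (List Int)) (q : List (Int × Int)),
    BfsInv C g q → 2 * pvZCount g + q.length + 1 ≤ fuel →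
    BfsInv C (pvBfs C.n C.m C.color fuel (g, q)) [] := by
  intro fuel
  induction fuel with
  | zero => intro g q _ hfuel; omega
  | succ fuel ih =>
    intro g q hInv hfuel
    match q with
    | [] => exact hInv
    | (i, j) :: rest =>
      show BfsInv C (pvBfs C.n C.m C.color fuel
        (pvDirs.foldl (pvBfsStep C.n C.m C.color i j) (g, rest))) []
      have hmid : MidInv C i j [] g rest :=
        { shape := hInv.shape
          val := hInv.val
          qmem := fun p hp => hInv.qmem p (List.mem_cons_of_mem _ hp)
          qreach := fun p hp => hInv.qreach p (List.mem_cons_of_mem _ hp)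
          popped := hInv.qreach (i, j) List.mem_cons_self
          closedO := fun p hps hpq hpij => hInv.closed p hps (by
            intro hmem
            rcases List.mem_cons.1 hmem with he | he
            · exact hpij he
            · exact hpq he)
          closedP := fun d hd => absurd hd (List.not_mem_nil) }
      obtain ⟨hmid', hle⟩ := pv_fold_dirs C i j pvDirs [] rfl g rest hmid
      have hInv' : BfsInv C (pvDirs.foldl (pvBfsStep C.n C.m C.color i j) (g, rest)).1
          (pvDirs.foldl (pvBfsStep C.n C.m C.color i j) (g, rest)).2 :=
        { shape := hmid'.shape
          val := hmid'.val
          qmem := hmid'.qmem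
          qreach := hmid'.qreach
          closed := fun p hps hpq d hd hz => by
            by_cases hpij : p = (i, j)
            · subst hpij
              exact hmid'.closedP d hd hz
            · exact hmid'.closedO p hps hpq hpij d hd hz }
      have := ih (pvDirs.foldl (pvBfsStep C.n C.m C.color i j) (g, rest)).1
        (pvDirs.foldl (pvBfsStep C.n C.m C.color i j) (g, rest)).2 hInv' (by
          simp only [List.length_cons] at hfuel
          omega)
      simpa using this

theorem pv_inv_final (C : FC) (g : List (List Int)) (h : BfsInv C g []) : Desc C g := by
  have hreach : ∀ x, Reach C.g1 C.n C.m C.s x → x = C.s ∨ Mk C g x := by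
    intro x hx
    induction hx with
    | base => exact Or.inl rfl
    | step hp hadj hz ih =>
      right
      obtain ⟨d, hd, hq⟩ := hadj
      rw [hq]
      exact h.closed _ ih (List.not_mem_nil) d hd (hq ▸ hz)
  refine ⟨h.shape, fun a b => ⟨?_, ?_⟩⟩
  · rintro ⟨hz, hr⟩
    rcases hreach _ hr with hs | hmk
    · exact absurd (hs ▸ hz) (fc_not_zero_s C)
    · exact hmk.2
  · intro hne
    rcases h.val a b with heq | ⟨hz, hr, _⟩
    · exact heq
    · exact absurd ⟨hz, hr⟩ hne

-- ==== B side ====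

theorem pv_nbr_true {r : PySem.Set (Int × Int)} {p y : Int × Int} (hy : y ∈ r)
    (hadj : ∃ d ∈ pvDirs, p = (y.1 + d.1, y.2 + d.2)) : pvNbr r p.1 p.2 = true := by
  obtain ⟨d, hd, hpq⟩ := hadj
  have hy' : r.contains (y.1, y.2) = true := by simp [PySem.Set.contains, hy]
  unfold pvNbr
  simp only [pvDirs, List.mem_cons, List.not_mem_nil, or_false] at hd
  simp only [Bool.or_eq_true]
  rcases hd with h | h | h | h <;> subst h <;> subst hpq
  · refine Or.inl (Or.inl (Or.inr ?_))
    convert hy' using 3 <;> simp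
  · refine Or.inl (Or.inl (Or.inl ?_))
    convert hy' using 3 <;> simp
  · refine Or.inr ?_
    convert hy' using 3 <;> simp
  · refine Or.inl (Or.inr ?_)
    convert hy' using 3 <;> simp

theorem pv_nbr_elim {r : PySem.Set (Int × Int)} {i j : Int} (h : pvNbr r i j = true) :
    ∃ y ∈ r, ∃ d ∈ pvDirs, (i, j) = (y.1 + d.1, y.2 + d.2) := by
  unfold pvNbr at h
  simp only [Bool.or_eq_true, PySem.Set.contains] at h
  rcases h with ((h | h) | h) | h
  · exact ⟨(i-1, j), by simpa using h, (1, 0), by simp [pvDirs], by rw [Prod.mk.injEq]; constructor <;> ring⟩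
  · exact ⟨(i+1, j), by simpa using h, (-1, 0), by simp [pvDirs], by rw [Prod.mk.injEq]; constructor <;> ring⟩
  · exact ⟨(i, j-1), by simpa using h, (0, 1), by simp [pvDirs], by rw [Prod.mk.injEq]; constructor <;> ring⟩
  · exact ⟨(i, j+1), by simpa using h, (0, -1), by simp [pvDirs], by rw [Prod.mk.injEq]; constructor <;> ring⟩

def Good (C : FC) (r : List (Int × Int)) : Prop :=
  (∀ x ∈ r, Reach C.g1 C.n C.m C.s x) ∧ r.Nodup ∧ C.s ∈ r ∧
    (∀ x ∈ r, x = C.s ∨ InB C.n C.m x)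

-- the sweep's per-cell update (what the nested fold becomes on the flattened cell list)
def pvSwF (C : FC) (st : PySem.Set (Int × Int) × Bool) (p : Int × Int) :
    PySem.Set (Int × Int) × Bool :=
  if pvCell C.g1 p.1 p.2 = 0 ∧ ¬ st.1.contains (p.1, p.2) ∧ pvNbr st.1 p.1 p.2 then
    (PySem.Set.add st.1 (p.1, p.2), true)
  else st

theorem pv_sweep_fold_good (C : FC) (r0 : List (Int × Int)) :
    ∀ (cs : List (Int × Int)) (st : PySem.Set (Int × Int) × Bool),
    (∀ p ∈ cs, InB C.n C.m p) →
    Good C st.1 → (∀ x ∈ r0, x ∈ st.1) → (st.2 = false → st.1 = r0) →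
    (st.2 = true → r0.length < st.1.length) →
    Good C (cs.foldl (pvSwF C) st).1 ∧ (∀ x ∈ r0, x ∈ (cs.foldl (pvSwF C) st).1) ∧
      ((cs.foldl (pvSwF C) st).2 = false → (cs.foldl (pvSwF C) st).1 = r0) ∧
      ((cs.foldl (pvSwF C) st).2 = true → r0.length < (cs.foldl (pvSwF C) st).1.length) := by
  intro cs
  induction cs with
  | nil => intro st _ h1 h2 h3 h4; exact ⟨h1, h2, h3, h4⟩
  | cons p cs ih =>
    intro st hcs hgood hsub hf ht
    simp only [List.foldl_cons]
    by_cases hguard : pvCell C.g1 p.1 p.2 = 0 ∧ ¬ st.1.contains (p.1, p.2) ∧ pvNbr st.1 p.1 p.2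
    case neg =>
      rw [show pvSwF C st p = st by unfold pvSwF; rw [if_neg hguard]]
      exact ih st (fun q hq => hcs q (List.mem_cons_of_mem _ hq)) hgood hsub hf ht
    case pos =>
      obtain ⟨hz, hnc, hnb⟩ := hguard
      have hnotmem : (p.1, p.2) ∉ st.1 := by
        intro hmem
        exact hnc (by simp [PySem.Set.contains, hmem])
      have hadd : PySem.Set.add st.1 (p.1, p.2) = st.1 ++ [(p.1, p.2)] := by
        simp [PySem.Set.add, PySem.Set.contains, hnotmem]
      have hstep : pvSwF C st p = (st.1 ++ [(p.1, p.2)], true) := by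
        unfold pvSwF
        rw [if_pos ⟨hz, hnc, hnb⟩, hadd]
      rw [hstep]
      have hInB : InB C.n C.m p := hcs p List.mem_cons_self
      have hreachp : Reach C.g1 C.n C.m C.s (p.1, p.2) := by
        obtain ⟨y, hy, d, hd, heq⟩ := pv_nbr_elim hnb
        exact Reach.step (hgood.1 y hy) ⟨d, hd, heq⟩
          ⟨by simpa using hInB, by simpa using hz⟩
      have hgood' : Good C (st.1 ++ [(p.1, p.2)]) := by
        refine ⟨?_, ?_, ?_, ?_⟩
        · intro x hx
          rcases List.mem_append.1 hx with hx | hx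
          · exact hgood.1 x hx
          · simp at hx; subst hx; exact hreachp
        · rw [List.nodup_append]
          exact ⟨hgood.2.1, by simp, by
            intro a ha b hb
            rw [List.mem_singleton] at hb
            subst hb
            intro he
            rw [he] at ha
            exact hnotmem ha⟩
        · exact List.mem_append.2 (Or.inl hgood.2.2.1)
        · intro x hx
          rcases List.mem_append.1 hx with hx | hx
          · exact hgood.2.2.2 x hx
          · simp at hx; subst hx; right; simpa using hInB
      have hlen : r0.length ≤ st.1.length := by
        cases hst : st.2 with
        | false => rw [hf hst]
        | true => exact le_of_lt (ht hst)
      have := ih (st.1 ++ [(p.1, p.2)], true) (fun q hq => hcs q (List.mem_cons_of_mem _ hq))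
        hgood' (fun x hx => List.mem_append.2 (Or.inl (hsub x hx)))
        (by intro h; simp at h) (by intro _; simp; omega)
      exact this

theorem pv_sweep_flag_mono (C : FC) : ∀ (cs : List (Int × Int)) (st : PySem.Set (Int × Int) × Bool),
    st.2 = true → (cs.foldl (pvSwF C) st).2 = true := by
  intro cs
  induction cs with
  | nil => intro st h; exact h
  | cons p cs ih =>
    intro st h
    simp only [List.foldl_cons]
    unfold pvSwF
    split
    · exact ih _ rfl
    · exact ih _ h

theorem pv_sweep_fold_false (C : FC) (r0 : List (Int × Int)) :
    ∀ (cs : List (Int × Int)),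
    (cs.foldl (pvSwF C) (r0, false)).2 = false →
    (cs.foldl (pvSwF C) (r0, false)).1 = r0 ∧
    ∀ p ∈ cs, ¬ (pvCell C.g1 p.1 p.2 = 0 ∧
      ¬ PySem.Set.contains r0 (p.1, p.2) ∧ pvNbr r0 p.1 p.2) := by
  intro cs
  induction cs with
  | nil => intro _; exact ⟨rfl, by simp⟩
  | cons p cs ih =>
    intro h
    simp only [List.foldl_cons] at h ⊢
    by_cases hguard : pvCell C.g1 p.1 p.2 = 0 ∧ ¬ PySem.Set.contains r0 (p.1, p.2) ∧
        pvNbr r0 p.1 p.2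
    case pos =>
      rw [show pvSwF C (r0, false) p = (PySem.Set.add r0 (p.1, p.2), true) by
        unfold pvSwF; dsimp only; rw [if_pos hguard]] at h
      rw [pv_sweep_flag_mono C cs _ rfl] at h
      exact absurd h (by simp)
    case neg =>
      rw [show pvSwF C (r0, false) p = (r0, false) by unfold pvSwF; dsimp only; rw [if_neg hguard]] at h ⊢
      obtain ⟨h1, h2⟩ := ih h
      refine ⟨h1, ?_⟩
      intro q hq
      rcases List.mem_cons.1 hq with he | he
      · subst he; exact hguard
      · exact h2 q he

-- nested for-loops are a fold over the row-major cell list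
theorem pv_foldl_nested {σ : Type} (F : σ → Int → Int → σ) :
    ∀ (l1 : List Int) (l2 : List Int) (init : σ),
    l1.foldl (fun st i => l2.foldl (fun st j => F st i j) st) init
      = (l1.flatMap (fun i => l2.map (fun j => (i, j)))).foldl (fun st p => F st p.1 p.2) init := by
  intro l1
  induction l1 with
  | nil => intro l2 init; simp
  | cons i l1 ih =>
    intro l2 init
    simp only [List.foldl_cons, List.flatMap_cons, List.foldl_append, List.foldl_map]
    exact ih l2 _

def pvCoords (n m : Int) : List (Int × Int) :=
  (PySem.List.pyRange 0 n 1).flatMap (fun i => (PySem.List.pyRange 0 m 1).map (fun j => (i, j)))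

theorem pv_mem_coords (n m : Int) (p : Int × Int) : p ∈ pvCoords n m ↔ InB n m p := by
  unfold pvCoords InB
  simp only [List.mem_flatMap, List.mem_map, PySem.List.mem_pyRange_one]
  constructor
  · rintro ⟨i, ⟨hi1, hi2⟩, j, ⟨hj1, hj2⟩, rfl⟩
    exact ⟨hi1, hi2, hj1, hj2⟩
  · rintro ⟨h1, h2, h3, h4⟩
    exact ⟨p.1, ⟨h1, h2⟩, p.2, ⟨h3, h4⟩, rfl⟩

theorem pv_len_le (C : FC) (r : List (Int × Int)) (hnd : r.Nodup)
    (hmem : ∀ x ∈ r, x = C.s ∨ InB C.n C.m x) :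
    r.length ≤ C.n.toNat * C.m.toNat + 1 := by
  have hsub : r.toFinset ⊆ insert C.s (Finset.Ico (0 : Int) C.n ×ˢ Finset.Ico (0 : Int) C.m) := by
    intro x hx
    rw [List.mem_toFinset] at hx
    rcases hmem x hx with hs | ⟨h1, h2, h3, h4⟩
    · exact Finset.mem_insert.2 (Or.inl hs)
    · refine Finset.mem_insert.2 (Or.inr ?_)
      rw [Finset.mem_product, Finset.mem_Ico, Finset.mem_Ico]
      exact ⟨⟨h1, h2⟩, h3, h4⟩
  have hcard := Finset.card_le_card hsub
  have h1 : r.toFinset.card = r.length := List.toFinset_card_of_nodup hnd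
  have h2 : (insert C.s (Finset.Ico (0 : Int) C.n ×ˢ Finset.Ico (0 : Int) C.m)).card ≤
      (Finset.Ico (0 : Int) C.n ×ˢ Finset.Ico (0 : Int) C.m).card + 1 :=
    Finset.card_insert_le _ _
  have h3 : (Finset.Ico (0 : Int) C.n ×ˢ Finset.Ico (0 : Int) C.m).card
      = C.n.toNat * C.m.toNat := by
    rw [Finset.card_product, Int.card_Ico, Int.card_Ico]
    simp
  omega

theorem pv_sweep_spec (C : FC) (r0 : List (Int × Int)) (hg : Good C r0) :
    Good C (pvSweep C.g1 C.n C.m r0).1 ∧ (∀ x ∈ r0, x ∈ (pvSweep C.g1 C.n C.m r0).1) ∧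
    ((pvSweep C.g1 C.n C.m r0).2 = false → (pvSweep C.g1 C.n C.m r0).1 = r0 ∧
      (∀ p, ZeroAt C.g1 C.n C.m p → p ∉ r0 → pvNbr r0 p.1 p.2 = false)) ∧
    ((pvSweep C.g1 C.n C.m r0).2 = true → r0.length < (pvSweep C.g1 C.n C.m r0).1.length) := by
  have hrw : pvSweep C.g1 C.n C.m r0 = (pvCoords C.n C.m).foldl (pvSwF C) (r0, false) := by
    unfold pvSweep pvCoords pvSwF
    exact pv_foldl_nested _ _ _ _
  rw [hrw]
  have hcs : ∀ p ∈ pvCoords C.n C.m, InB C.n C.m p := fun p hp => (pv_mem_coords _ _ p).1 hp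
  obtain ⟨hgood, hsub, hfalse, htrue⟩ := pv_sweep_fold_good C r0 (pvCoords C.n C.m) (r0, false)
    hcs hg (fun x hx => hx) (fun _ => rfl) (by intro h; simp at h)
  refine ⟨hgood, hsub, ?_, htrue⟩
  intro hf
  obtain ⟨heq, hall⟩ := pv_sweep_fold_false C r0 (pvCoords C.n C.m) hf
  refine ⟨heq, ?_⟩
  intro p hz hnotin
  by_contra hnb
  have hmem := (pv_mem_coords C.n C.m p).2 hz.1
  have := hall p hmem
  apply this
  refine ⟨by simpa using hz.2, ?_, by simpa using (Bool.of_not_eq_false hnb)⟩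
  intro hcont
  apply hnotin
  simpa [PySem.Set.contains] using hcont

theorem pv_closed_reach (C : FC) (r : List (Int × Int)) (hs : C.s ∈ r)
    (hcl : ∀ p, ZeroAt C.g1 C.n C.m p → p ∉ r → pvNbr r p.1 p.2 = false) :
    ∀ x, Reach C.g1 C.n C.m C.s x → x ∈ r := by
  intro x hx
  induction hx with
  | base => exact hs
  | step hp hadj hz ih =>
    by_contra hnotin
    have hnb : pvNbr r _ _ = false := hcl _ hz hnotin
    rw [pv_nbr_true ih hadj] at hnb
    exact absurd hnb (by simp)

theorem pv_saturate_run (C : FC) : ∀ (fuel : Nat) (r : List (Int × Int)), Good C r →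
    C.n.toNat * C.m.toNat + 2 ≤ fuel + r.length →
    Good C (pvSaturate C.g1 C.n C.m fuel r) ∧
      (∀ x, Reach C.g1 C.n C.m C.s x → x ∈ pvSaturate C.g1 C.n C.m fuel r) := by
  intro fuel
  induction fuel with
  | zero =>
    intro r hg hb
    have := pv_len_le C r hg.2.1 hg.2.2.2
    omega
  | succ fuel ih =>
    intro r hg hb
    obtain ⟨hgood, hsub, hfalse, htrue⟩ := pv_sweep_spec C r hg
    have hsat : pvSaturate C.g1 C.n C.m (fuel + 1) r =
        if (pvSweep C.g1 C.n C.m r).2 then pvSaturate C.g1 C.n C.m fuel (pvSweep C.g1 C.n C.m r).1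
        else (pvSweep C.g1 C.n C.m r).1 := rfl
    rw [hsat]
    cases hflag : (pvSweep C.g1 C.n C.m r).2 with
    | true =>
      rw [if_pos rfl]
      exact ih _ hgood (by have := htrue hflag; omega)
    | false =>
      rw [if_neg (by simp)]
      obtain ⟨heq, hcl⟩ := hfalse hflag
      refine ⟨hgood, ?_⟩
      rw [heq]
      exact pv_closed_reach C r hg.2.2.1 hcl

theorem pv_region_spec (C : FC) :
    ∀ x, x ∈ pvRegion C.g1 C.n C.m C.s.1 C.s.2 ↔ Reach C.g1 C.n C.m C.s x := by
  have hof : PySem.Set.ofList [(C.s.1, C.s.2)] = [(C.s.1, C.s.2)] := by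
    simp [PySem.Set.ofList, PySem.Set.add, PySem.Set.contains]
  have hinit : Good C [(C.s.1, C.s.2)] := by
    refine ⟨?_, by simp, by simp, ?_⟩
    · intro x hx
      rw [List.mem_singleton] at hx
      subst hx
      exact Reach.base
    · intro x hx
      rw [List.mem_singleton] at hx
      exact Or.inl hx
  have hn0 : 0 ≤ C.n := by have := C.hn; omega
  have hbound : C.n.toNat * C.m.toNat + 2 ≤ ((C.n * C.m).toNat + 1) + 1 := by
    obtain ⟨n', hn'⟩ := Int.eq_ofNat_of_zero_le hn0
    obtain ⟨m', hm'⟩ := Int.eq_ofNat_of_zero_le C.hm0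
    rw [hn', hm', Int.toNat_natCast, Int.toNat_natCast, ← Nat.cast_mul, Int.toNat_natCast]
  have hrun := pv_saturate_run C ((C.n * C.m).toNat + 1) [(C.s.1, C.s.2)] hinit (by simpa using hbound)
  unfold pvRegion
  rw [hof]
  intro x
  exact ⟨fun hx => hrun.1.1 x hx, fun hx => hrun.2 x hx⟩

theorem pv_paint_fold (C : FC) : ∀ (L W : List (Int × Int)) (g : List (List Int)),
    (∀ x ∈ L, Reach C.g1 C.n C.m C.s x) → SameShape g C.g1 →
    (∀ a b : Nat,
      (((a : Int), (b : Int)) ∈ W ∧ ZeroAt C.g1 C.n C.m ((a : Int), (b : Int)) →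
        pvCell g (a : Int) (b : Int) = C.color) ∧
      (¬ (((a : Int), (b : Int)) ∈ W ∧ ZeroAt C.g1 C.n C.m ((a : Int), (b : Int))) →
        pvCell g (a : Int) (b : Int) = pvCell C.g1 (a : Int) (b : Int))) →
    SameShape (L.foldl (fun g p => pvSetCell g p.1 p.2 C.color) g) C.g1 ∧
    ∀ a b : Nat,
      (((a : Int), (b : Int)) ∈ W ++ L ∧ ZeroAt C.g1 C.n C.m ((a : Int), (b : Int)) →
        pvCell (L.foldl (fun g p => pvSetCell g p.1 p.2 C.color) g) (a : Int) (b : Int) = C.color) ∧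
      (¬ (((a : Int), (b : Int)) ∈ W ++ L ∧ ZeroAt C.g1 C.n C.m ((a : Int), (b : Int))) →
        pvCell (L.foldl (fun g p => pvSetCell g p.1 p.2 C.color) g) (a : Int) (b : Int)
          = pvCell C.g1 (a : Int) (b : Int)) := by
  intro L
  induction L with
  | nil =>
    intro W g _ hshape hval
    simp only [List.foldl_nil, List.append_nil]
    exact ⟨hshape, hval⟩
  | cons p L ih =>
    intro W g hL hshape hval
    simp only [List.foldl_cons]
    have hlen : g.length = C.g1.length := hshape.1
    have happ : W ++ p :: L = (W ++ [p]) ++ L := by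
      rw [List.append_assoc]
      rfl
    rw [happ]
    have hnext : ∀ g', SameShape g' C.g1 →
        (∀ a b : Nat,
          (((a : Int), (b : Int)) ∈ W ++ [p] ∧ ZeroAt C.g1 C.n C.m ((a : Int), (b : Int)) →
            pvCell g' (a : Int) (b : Int) = C.color) ∧
          (¬ (((a : Int), (b : Int)) ∈ W ++ [p] ∧ ZeroAt C.g1 C.n C.m ((a : Int), (b : Int))) →
            pvCell g' (a : Int) (b : Int) = pvCell C.g1 (a : Int) (b : Int))) →
        SameShape (L.foldl (fun g p => pvSetCell g p.1 p.2 C.color) g') C.g1 ∧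
        ∀ a b : Nat,
          (((a : Int), (b : Int)) ∈ (W ++ [p]) ++ L ∧ ZeroAt C.g1 C.n C.m ((a : Int), (b : Int)) →
            pvCell (L.foldl (fun g p => pvSetCell g p.1 p.2 C.color) g') (a : Int) (b : Int) = C.color) ∧
          (¬ (((a : Int), (b : Int)) ∈ (W ++ [p]) ++ L ∧ ZeroAt C.g1 C.n C.m ((a : Int), (b : Int))) →
            pvCell (L.foldl (fun g p => pvSetCell g p.1 p.2 C.color) g') (a : Int) (b : Int)
              = pvCell C.g1 (a : Int) (b : Int)) :=
      fun g' hs hv => ih (W ++ [p]) g' (fun x hx => hL x (List.mem_cons_of_mem _ hx)) hs hv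
    rcases reach_cases (hL p List.mem_cons_self) with hps | hzp
    · -- p is the raw seed: the write is a no-op pointwise
      subst hps
      have hRR : (pvNorm g.length C.s.1).toNat = (pvNorm C.g1.length C.s.1).toNat := by
        rw [hlen]
      have hroweq : (pvRow g (pvNorm C.g1.length C.s.1).toNat).length
          = (pvRow C.g1 (pvNorm C.g1.length C.s.1).toNat).length := sameShape_row hshape _
      have hr' : (pvNorm g.length C.s.1).toNat < g.length := by
        rw [hRR, hlen]
        exact C.hsr
      have hCC : (pvNorm (pvRow g (pvNorm C.g1.length C.s.1).toNat).length C.s.2).toNat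
          = (pvNorm (pvRow C.g1 (pvNorm C.g1.length C.s.1).toNat).length C.s.2).toNat := by
        rw [hroweq]
      have hc' : (pvNorm (pvRow g (pvNorm g.length C.s.1).toNat).length C.s.2).toNat
          < (pvRow g (pvNorm g.length C.s.1).toNat).length := by
        rw [hRR, hCC, hroweq]
        exact C.hsc
      have E := pvCell_setCell g C.s.1 C.s.2 C.color hr' hc'
      have hnz : ¬ ZeroAt C.g1 C.n C.m
          (((pvNorm C.g1.length C.s.1).toNat : Int),
           ((pvNorm (pvRow C.g1 (pvNorm C.g1.length C.s.1).toNat).length C.s.2).toNat : Int)) := by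
        intro hz
        exact C.hc (C.hseed.symm.trans hz.2)
      apply hnext
      · exact sameShape_trans (pvSetCell_shape g _ _ _) hshape
      · intro a b
        have Eab := E a b
        rw [hRR, hCC] at Eab
        by_cases hab : a = (pvNorm C.g1.length C.s.1).toNat ∧
            b = (pvNorm (pvRow C.g1 (pvNorm C.g1.length C.s.1).toNat).length C.s.2).toNat
        · rw [Eab, if_pos hab]
          obtain ⟨ha, hb⟩ := hab
          subst ha; subst hb
          constructor
          · intro _; rfl
          · intro _
            exact C.hseed.symm
        · rw [Eab, if_neg hab]
          have hv := hval a b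
          constructor
          · rintro ⟨hmem, hz⟩
            rcases List.mem_append.1 hmem with hmem | hmem
            · exact hv.1 ⟨hmem, hz⟩
            · rw [List.mem_singleton] at hmem
              exfalso
              exact fc_not_zero_s C (hmem ▸ hz)
          · intro hnc
            apply hv.2
            intro ⟨hmem, hz⟩
            exact hnc ⟨List.mem_append.2 (Or.inl hmem), hz⟩
    · -- p is an in-bounds zero cell of g1
      obtain ⟨⟨hp1, hp2, hp3, hp4⟩, hpz⟩ := hzp
      have hn := C.hn
      have hrlen : (pvRow g p.1.toNat).length = (pvRow C.g1 p.1.toNat).length :=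
        sameShape_row hshape _
      have hrows := C.hrows p.1.toNat (by omega)
      have hni : pvNorm g.length p.1 = p.1 := by unfold pvNorm; omega
      have hr' : (pvNorm g.length p.1).toNat < g.length := by rw [hni]; omega
      have hm0 := C.hm0
      have hnj : pvNorm (pvRow g p.1.toNat).length p.2 = p.2 := by
        unfold pvNorm
        omega
      have hc' : (pvNorm (pvRow g (pvNorm g.length p.1).toNat).length p.2).toNat
          < (pvRow g (pvNorm g.length p.1).toNat).length := by
        rw [hni, hnj]
        omega
      have E : ∀ a b : Nat, pvCell (pvSetCell g p.1 p.2 C.color) (a : Int) (b : Int) =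
          if a = p.1.toNat ∧ b = p.2.toNat then C.color else pvCell g (a : Int) (b : Int) := by
        intro a b
        have := pvCell_setCell g p.1 p.2 C.color hr' hc' a b
        rwa [hni, hnj] at this
      apply hnext
      · exact sameShape_trans (pvSetCell_shape g _ _ _) hshape
      · intro a b
        have Eab := E a b
        have hv := hval a b
        by_cases hab : a = p.1.toNat ∧ b = p.2.toNat
        · obtain ⟨ha, hb⟩ := hab
          subst ha; subst hb
          have hcast1 : ((p.1.toNat : Nat) : Int) = p.1 := by omega
          have hcast2 : ((p.2.toNat : Nat) : Int) = p.2 := by omega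
          constructor
          · intro _
            rw [Eab, if_pos ⟨rfl, rfl⟩]
          · intro hnc
            exfalso
            apply hnc
            rw [hcast1, hcast2]
            exact ⟨List.mem_append.2 (Or.inr (by simp)), ⟨hp1, hp2, hp3, hp4⟩, hpz⟩
        · have hne : ¬ (((a : Int), (b : Int)) = p) := by
            intro he
            apply hab
            constructor <;> [skip; skip] <;>
              · have h1 := congrArg Prod.fst he
                have h2 := congrArg Prod.snd he
                simp at h1 h2
                omega
          rw [Eab, if_neg hab]
          constructor
          · rintro ⟨hmem, hz⟩
            rcases List.mem_append.1 hmem with hmem | hmem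
            · exact hv.1 ⟨hmem, hz⟩
            · rw [List.mem_singleton] at hmem
              exact absurd hmem hne
          · intro hnc
            apply hv.2
            intro ⟨hmem, hz⟩
            exact hnc ⟨List.mem_append.2 (Or.inl hmem), hz⟩

theorem pv_paint_desc (C : FC) (g0 : List (List Int))
    (hg1 : pvSetCell g0 C.s.1 C.s.2 C.color = C.g1) :
    Desc C (pvPaint g0 C.n C.m C.s.1 C.s.2 C.color) := by
  show Desc C ((pvRegion (pvSetCell g0 C.s.1 C.s.2 C.color) C.n C.m C.s.1 C.s.2).foldl
      (fun g p => pvSetCell g p.1 p.2 C.color) (pvSetCell g0 C.s.1 C.s.2 C.color))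
  rw [hg1]
  obtain ⟨hsh, hval⟩ := pv_paint_fold C (pvRegion C.g1 C.n C.m C.s.1 C.s.2) [] C.g1
    (fun x hx => (pv_region_spec C x).1 hx) (sameShape_refl _)
    (fun a b => ⟨fun h => absurd h.1 (List.not_mem_nil), fun _ => rfl⟩)
  refine ⟨hsh, fun a b => ⟨?_, ?_⟩⟩
  · rintro ⟨hz, hr⟩
    exact (hval a b).1 ⟨by simpa using (pv_region_spec C _).2 hr, hz⟩
  · intro hn
    apply (hval a b).2
    rintro ⟨hmem, hz⟩
    exact hn ⟨hz, (pv_region_spec C _).1 (by simpa using hmem)⟩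

theorem pv_flood_desc (C : FC) (g0 : List (List Int))
    (hg1 : pvSetCell g0 C.s.1 C.s.2 C.color = C.g1)
    (hn0 : (g0.length : Int) = C.n) (hm : ((pvRow g0 0).length : Int) = C.m) :
    Desc C (pvFlood g0 C.s.1 C.s.2 C.color) := by
  show Desc C (pvBfs (g0.length : Int) (((pvRow g0 0).length : Int)) C.color
    (2 * pvZCount (pvSetCell g0 C.s.1 C.s.2 C.color) + 2)
    (pvSetCell g0 C.s.1 C.s.2 C.color, [(C.s.1, C.s.2)]))
  rw [hn0, hm, hg1]
  have hInv : BfsInv C C.g1 [(C.s.1, C.s.2)] :=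
    { shape := sameShape_refl _
      val := fun a b => Or.inl rfl
      qmem := fun p hp => Or.inl (by simpa using hp)
      qreach := fun p hp => by
        have : p = C.s := by simpa using hp
        rw [this]
        exact Reach.base
      closed := fun p hps hpq d hd hz => by
        rcases hps with hs | ⟨⟨_, hz0⟩, hcol⟩
        · exact absurd (by simp [hs]) hpq
        · exact absurd (hz0 ▸ hcol.symm) C.hc }
  exact pv_inv_final C _ (pv_bfs_run C _ _ _ hInv (by simp))

theorem pv_desc_unique (C : FC) (g h : List (List Int)) (hg : Desc C g) (hh : Desc C h) :
    g = h := by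
  apply pv_grid_ext
  · exact hg.1.1.trans hh.1.1.symm
  · intro k
    exact (hg.1.2 k).trans (hh.1.2 k).symm
  · intro a b
    by_cases hc : ZeroAt C.g1 C.n C.m ((a : Int), (b : Int)) ∧
        Reach C.g1 C.n C.m C.s ((a : Int), (b : Int))
    · rw [(hg.2 a b).1 hc, (hh.2 a b).1 hc]
    · rw [(hg.2 a b).2 hc, (hh.2 a b).2 hc]

theorem pv_fc_exists (g0 : List (List Int)) (si sj c : Int) (hc : c ≠ 0)
    (hrows : ∀ a : Nat, a < g0.length → (pvRow g0 0).length ≤ (pvRow g0 a).length)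
    (hr : (pvNorm g0.length si).toNat < g0.length)
    (hcc : (pvNorm (pvRow g0 (pvNorm g0.length si).toNat).length sj).toNat
            < (pvRow g0 (pvNorm g0.length si).toNat).length) :
    ∃ C : FC, C.g1 = pvSetCell g0 si sj c ∧ C.n = (g0.length : Int) ∧
      C.m = ((pvRow g0 0).length : Int) ∧ C.color = c ∧ C.s = (si, sj) := by
  have hshape := pvSetCell_shape g0 si sj c
  have hlen : (pvSetCell g0 si sj c).length = g0.length := hshape.1
  have hrow : ∀ a : Nat, (pvRow (pvSetCell g0 si sj c) a).length = (pvRow g0 a).length :=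
    fun a => sameShape_row hshape a
  have hR : (pvNorm (pvSetCell g0 si sj c).length si).toNat = (pvNorm g0.length si).toNat := by
    rw [hlen]
  have hC : (pvNorm (pvRow (pvSetCell g0 si sj c) (pvNorm (pvSetCell g0 si sj c).length si).toNat).length sj).toNat
      = (pvNorm (pvRow g0 (pvNorm g0.length si).toNat).length sj).toNat := by
    rw [hR, hrow]
  refine ⟨FC.mk (pvSetCell g0 si sj c) (g0.length : Int) ((pvRow g0 0).length : Int) c (si, sj)
    (by rw [hlen]) (Int.natCast_nonneg _) ?_ hc ?_ ?_ ?_, rfl, rfl, rfl, rfl, rfl⟩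
  · intro a ha
    rw [hrow a, Int.toNat_natCast]
    exact hrows a (by rw [hlen] at ha; exact ha)
  · rw [hR, hlen]
    exact hr
  · rw [hC, hR, hrow]
    exact hcc
  · show pvCell (pvSetCell g0 si sj c) _ _ = c
    rw [hR, hrow]
    have := pvCell_setCell g0 si sj c hr hcc (pvNorm g0.length si).toNat
      (pvNorm (pvRow g0 (pvNorm g0.length si).toNat).length sj).toNat
    rwa [if_pos ⟨rfl, rfl⟩] at this

theorem pv_flood_eq_paint (g0 : List (List Int)) (si sj c : Int) (hc : c ≠ 0)
    (hrows : ∀ a : Nat, a < g0.length → (pvRow g0 0).length ≤ (pvRow g0 a).length)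
    (hr : (pvNorm g0.length si).toNat < g0.length)
    (hcc : (pvNorm (pvRow g0 (pvNorm g0.length si).toNat).length sj).toNat
            < (pvRow g0 (pvNorm g0.length si).toNat).length) :
    pvFlood g0 si sj c = pvPaint g0 (g0.length : Int) ((pvRow g0 0).length : Int) si sj c := by
  obtain ⟨C, h1, h2, h3, h4, h5⟩ := pv_fc_exists g0 si sj c hc hrows hr hcc
  have hs1 : C.s.1 = si := by rw [h5]
  have hs2 : C.s.2 = sj := by rw [h5]
  have hf := pv_flood_desc C g0 (by rw [hs1, hs2, h4, h1]) (by rw [h2]) (by rw [h3])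
  have hp := pv_paint_desc C g0 (by rw [hs1, hs2, h4, h1])
  have := pv_desc_unique C _ _ hf hp
  rwa [hs1, hs2, h4, h2, h3] at this

-- shape facts maintained along the outer scan
def GOK (n m : Int) (g : List (List Int)) : Prop :=
  (g.length : Int) = n ∧ ((pvRow g 0).length : Int) = m ∧
    ∀ a : Nat, a < g.length → m.toNat ≤ (pvRow g a).length

theorem pv_gok_shape {n m : Int} {g h : List (List Int)} (hg : GOK n m g) (hs : SameShape h g) :
    GOK n m h := by
  refine ⟨by rw [hs.1]; exact hg.1, by rw [sameShape_row hs 0]; exact hg.2.1, ?_⟩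
  intro a ha
  rw [sameShape_row hs a]
  exact hg.2.2 a (by rw [← hs.1]; exact ha)

theorem pv_flood_shape (g0 : List (List Int)) (si sj c : Int) (hc : c ≠ 0)
    (hrows : ∀ a : Nat, a < g0.length → (pvRow g0 0).length ≤ (pvRow g0 a).length)
    (hr : (pvNorm g0.length si).toNat < g0.length)
    (hcc : (pvNorm (pvRow g0 (pvNorm g0.length si).toNat).length sj).toNat
            < (pvRow g0 (pvNorm g0.length si).toNat).length) :
    SameShape (pvFlood g0 si sj c) g0 := by
  obtain ⟨C, h1, h2, h3, h4, h5⟩ := pv_fc_exists g0 si sj c hc hrows hr hcc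
  have hs1 : C.s.1 = si := by rw [h5]
  have hs2 : C.s.2 = sj := by rw [h5]
  have hf := pv_flood_desc C g0 (by rw [hs1, hs2, h4, h1]) (by rw [h2]) (by rw [h3])
  have := sameShape_trans hf.1 (h1 ▸ pvSetCell_shape g0 si sj c)
  rwa [hs1, hs2, h4] at this

theorem pv_scan_eq (n m : Int) : ∀ (cs : List (Int × Int)) (g : List (List Int)) (c : Int),
    GOK n m g → 0 < c → (∀ p ∈ cs, InB n m p) →
    cs.foldl (fun st p =>
        if pvCell st.1 p.1 p.2 = 0 then (pvFlood st.1 p.1 p.2 (st.2 + 1), st.2 + 1) else st) (g, c)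
      = cs.foldl (fun st p =>
        if pvCell st.1 p.1 p.2 = 0 then (pvPaint st.1 n m p.1 p.2 (st.2 + 1), st.2 + 1) else st) (g, c) := by
  intro cs
  induction cs with
  | nil => intro g c _ _ _; rfl
  | cons p cs ih =>
    intro g c hgok hc hcs
    simp only [List.foldl_cons]
    have hInB := hcs p List.mem_cons_self
    obtain ⟨hp1, hp2, hp3, hp4⟩ := hInB
    by_cases hz : pvCell g p.1 p.2 = 0
    case neg =>
      rw [if_neg hz, if_neg hz]
      exact ih g c hgok hc (fun q hq => hcs q (List.mem_cons_of_mem _ hq))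
    case pos =>
      rw [if_pos hz, if_pos hz]
      obtain ⟨hgn, hgm, hgrows⟩ := hgok
      have hm0 : (0 : Int) ≤ m := by omega
      have hrow0 : (pvRow g 0).length = m.toNat := by omega
      have hrows' : ∀ a : Nat, a < g.length → (pvRow g 0).length ≤ (pvRow g a).length := by
        intro a ha
        have := hgrows a ha
        omega
      have h1 : pvNorm g.length p.1 = p.1 := by unfold pvNorm; omega
      have hr' : (pvNorm g.length p.1).toNat < g.length := by rw [h1]; omega
      have hrowlen := hgrows p.1.toNat (by omega)
      have h2 : pvNorm (pvRow g p.1.toNat).length p.2 = p.2 := by unfold pvNorm; omega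
      have hcc' : (pvNorm (pvRow g (pvNorm g.length p.1).toNat).length p.2).toNat
          < (pvRow g (pvNorm g.length p.1).toNat).length := by
        rw [h1, h2]
        omega
      have heq := pv_flood_eq_paint g p.1 p.2 (c + 1) (by omega) hrows' hr' hcc'
      have hshape := pv_flood_shape g p.1 p.2 (c + 1) (by omega) hrows' hr' hcc'
      have hgm' : ((pvRow g 0).length : Int) = m := by omega
      have hgn' : (g.length : Int) = n := hgn
      rw [hgn', hgm'] at heq
      rw [heq] at hshape ⊢
      exact ih _ _ (pv_gok_shape ⟨hgn, hgm, hgrows⟩ hshape) (by omega)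
        (fun q hq => hcs q (List.mem_cons_of_mem _ hq))

-- ===== VERDICT (by name: the statement is the Claim_ definition above) =====
theorem fill_all_regions_spec : Claim_equal_fill_all_regions := by
  intro grid sx sy hdom hpre
  obtain ⟨hn0, hrowsPre, hsx, hsy⟩ := hpre
  unfold Spec_fill_all_regions
  have hrows' : ∀ a : Nat, a < grid.length → (pvRow grid 0).length ≤ (pvRow grid a).length := by
    intro a ha
    have hmem : grid[a] ∈ grid := List.getElem_mem ha
    have := hrowsPre grid[a] hmem
    have hrw : pvRow grid a = grid[a] := by
      unfold pvRow
      rw [List.getElem?_eq_getElem ha]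
      rfl
    rw [hrw]
    exact this
  have hr : (pvNorm grid.length sx).toNat < grid.length := by
    unfold pvNorm
    split <;> omega
  have hsy' : -((pvRow grid (pvNorm grid.length sx).toNat).length : Int) ≤ sy ∧
      sy < ((pvRow grid (pvNorm grid.length sx).toNat).length : Int) := hsy
  have hcc : (pvNorm (pvRow grid (pvNorm grid.length sx).toNat).length sy).toNat
      < (pvRow grid (pvNorm grid.length sx).toNat).length := by
    generalize hR : (pvNorm grid.length sx).toNat = R at hsy' ⊢
    unfold pvNorm
    split <;> omega
  have heq := pv_flood_eq_paint grid sx sy 2 (by norm_num) hrows' hr hcc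
  have hshape := pv_flood_shape grid sx sy 2 (by norm_num) hrows' hr hcc
  have hgok : GOK (grid.length : Int) ((pvRow grid 0).length : Int) grid := by
    refine ⟨rfl, rfl, ?_⟩
    intro a ha
    have := hrows' a ha
    omega
  have e1 : fill_all_regions grid sx sy =
      ((pvCoords (grid.length : Int) ((pvRow grid 0).length : Int)).foldl
        (fun st p => if pvCell st.1 p.1 p.2 = 0
          then (pvFlood st.1 p.1 p.2 (st.2 + 1), st.2 + 1) else st)
        (pvFlood grid sx sy 2, 2)).2 :=
    congrArg Prod.snd (pv_foldl_nested
      (fun st i j => if pvCell st.1 i j = 0 then (pvFlood st.1 i j (st.2 + 1), st.2 + 1) else st)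
      (PySem.List.pyRange 0 (grid.length : Int) 1)
      (PySem.List.pyRange 0 ((pvRow grid 0).length : Int) 1) (pvFlood grid sx sy 2, 2))
  have e2 : fill_all_regions_alt grid sx sy =
      ((pvCoords (grid.length : Int) ((pvRow grid 0).length : Int)).foldl
        (fun st p => if pvCell st.1 p.1 p.2 = 0
          then (pvPaint st.1 (grid.length : Int) ((pvRow grid 0).length : Int) p.1 p.2 (st.2 + 1),
            st.2 + 1) else st)
        (pvPaint grid (grid.length : Int) ((pvRow grid 0).length : Int) sx sy 2, 2)).2 :=
    congrArg Prod.snd (pv_foldl_nested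
      (fun st i j => if pvCell st.1 i j = 0
        then (pvPaint st.1 (grid.length : Int) ((pvRow grid 0).length : Int) i j (st.2 + 1),
          st.2 + 1) else st)
      (PySem.List.pyRange 0 (grid.length : Int) 1)
      (PySem.List.pyRange 0 ((pvRow grid 0).length : Int) 1)
      (pvPaint grid (grid.length : Int) ((pvRow grid 0).length : Int) sx sy 2, 2))
  rw [e1, e2, ← heq]
  exact congrArg Prod.snd (pv_scan_eq (grid.length : Int) ((pvRow grid 0).length : Int)
    (pvCoords (grid.length : Int) ((pvRow grid 0).length : Int)) (pvFlood grid sx sy 2) 2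
    (pv_gok_shape hgok hshape) (by norm_num)
    (fun p hp => (pv_mem_coords _ _ p).1 hp))
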